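-- pv_equiv track=rewrite | github.com/oqtopus-team/qdash | src/qdash/workflow/engine/scheduler/one_qubit_scheduler.py | _group_mixed_muxes_by_box_b
-- ===== SOURCE A (Python) =====
-- def _group_mixed_muxes_by_box_b(
--
--     mixed_mux_ids: list[int],
--     box_b_module_map: dict[str, list[int]],
-- ) -> list[list[int]]:
--     """Group MIXED MUXes by Box B module for sequential execution.
--
--     MUXes sharing the same Box B module must execute in separate groups
--     (cannot run in parallel).
--
--     Args:
--         mixed_mux_ids: List of MIXED MUX IDs to group
--         box_b_module_map: Mapping from Box B module to MUX IDs
--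
--     Returns:
--         List of MUX ID groups. Each group can run in parallel,
--         but groups must execute sequentially.
--
--     Example:
--         Input: [0, 3, 4, 7] with R21B→[0,4], U10B→[3,7]
--         Output: [[0, 3], [4, 7]]
--         - Group 0: MUX 0 (R21B first), MUX 3 (U10B first)
--         - Group 1: MUX 4 (R21B second), MUX 7 (U10B second)
--     """
--     if not mixed_mux_ids:
--         return []
--
--     mixed_set = set(mixed_mux_ids)
--
--     # Build reverse map: MUX → Box B module
--     mux_to_box_b: dict[int, str] = {}
--     for module_id, mux_ids in box_b_module_map.items():
--         for mux_id in mux_ids: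
--             if mux_id in mixed_set:
--                 mux_to_box_b[mux_id] = module_id
--
--     # Find the maximum group index needed
--     max_group_idx = 0
--     for module_id, mux_ids in box_b_module_map.items():
--         count = sum(1 for m in mux_ids if m in mixed_set)
--         max_group_idx = max(max_group_idx, count)
--
--     if max_group_idx == 0:
--         # No Box B sharing, all can run in parallel
--         return [list(mixed_mux_ids)]
--
--     # Assign each MUX to a group based on its position in the Box B module
--     groups: list[list[int]] = [[] for _ in range(max_group_idx)]
--
--     for module_id, mux_ids in box_b_module_map.items():
--         relevant_muxes = [m for m in mux_ids if m in mixed_set]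
--         for idx, mux_id in enumerate(relevant_muxes):
--             groups[idx].append(mux_id)
--
--     # Sort MUXes within each group
--     for group in groups:
--         group.sort()
--
--     # Filter out empty groups
--     return [g for g in groups if g]
-- ===== SOURCE B (Python) =====
-- def _group_mixed_muxes_by_box_b(mixed_mux_ids, box_b_module_map):
--     """Sort-then-scan: emit one (slot, mux) event per relevant MUX occurrence,
--     sort the whole event list once (slot first, then mux), and cut it into
--     runs of equal slot; each run is one sequential group."""
--     if not mixed_mux_ids:
--         return []
--
--     mixed_set = set(mixed_mux_ids)
--     events = []
--     for mux_ids in box_b_module_map.values():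
--         slot = 0
--         for m in mux_ids:
--             if m in mixed_set:
--                 events.append((slot, m))
--                 slot += 1
--
--     if not events:
--         # no Box B module contains any MIXED MUX: everything runs in parallel
--         return [list(mixed_mux_ids)]
--
--     events.sort()
--     groups = []
--     i = 0
--     n = len(events)
--     while i < n:
--         slot = events[i][0]
--         j = i
--         while j < n and events[j][0] == slot:
--             j += 1
--         groups.append([m for _, m in events[i:j]])
--         i = j
--     return groups
-- ===== Notes on version B (the rewrite author's own statement) =====
-- stated objective: alternative
-- what changed: A preallocates max-count groups and fills them by indexed appends per module; B instead flattens everything into (slot, mux) events, sorts that flat list once (slot-major, mux-minor), and cuts the sorted list into runs of equal slot — a sort-then-scan that needs no reverse map, no separate max pass and no preallocated group table.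
import Mathlib
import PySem

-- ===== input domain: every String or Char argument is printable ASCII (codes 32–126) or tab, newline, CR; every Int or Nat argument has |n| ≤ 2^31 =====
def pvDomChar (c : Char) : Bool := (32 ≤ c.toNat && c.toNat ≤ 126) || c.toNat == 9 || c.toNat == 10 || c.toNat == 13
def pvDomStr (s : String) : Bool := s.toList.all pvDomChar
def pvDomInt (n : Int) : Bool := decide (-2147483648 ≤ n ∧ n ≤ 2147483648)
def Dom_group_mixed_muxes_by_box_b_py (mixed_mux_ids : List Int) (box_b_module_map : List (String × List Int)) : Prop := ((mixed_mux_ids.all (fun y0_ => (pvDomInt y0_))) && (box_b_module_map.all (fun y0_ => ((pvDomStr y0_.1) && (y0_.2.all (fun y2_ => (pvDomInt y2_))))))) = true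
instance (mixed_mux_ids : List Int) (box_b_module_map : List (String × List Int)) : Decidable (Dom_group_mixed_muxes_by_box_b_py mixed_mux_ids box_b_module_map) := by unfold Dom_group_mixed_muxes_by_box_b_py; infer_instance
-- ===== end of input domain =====

-- B replaces A's reverse map, max-count pass and preallocated index-mutated group table by a
-- sort-then-scan: one flat (slot, mux) event list, sorted once, cut into runs of equal slot
-- (objective: alternative; same asymptotic cost).

-- ===== PORT A =====
-- groups[idx].append(mux_id)  (indexed read-modify-write on the groups list)
def pvAppendAt (gs : List (List Int)) (i : Int) (x : Int) : List (List Int) :=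
  PySem.List.pySetD gs i (PySem.List.pyGetD gs i [] ++ [x])

def group_mixed_muxes_by_box_b_py (mixed_mux_ids : List Int) (box_b_module_map : List (String × List Int)) : List (List Int) :=
  if mixed_mux_ids = [] then [] else
  let mixed_set : PySem.Set Int := PySem.Set.ofList mixed_mux_ids
  let items := (PySem.Dict.ofList box_b_module_map).items
  let _mux_to_box_b : PySem.Dict Int String :=
    items.foldl (fun d kv => kv.2.foldl (fun d m =>
      if PySem.Set.contains mixed_set m then d.insert m kv.1 else d) d) PySem.Dict.empty
  let max_group_idx : Nat :=
    items.foldl (fun acc kv => max acc (kv.2.countP (fun m => PySem.Set.contains mixed_set m))) 0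
  if max_group_idx = 0 then [mixed_mux_ids] else
  let groups0 : List (List Int) := List.replicate max_group_idx []
  let groups := items.foldl (fun gs kv =>
      (PySem.List.enumerate (kv.2.filter (fun m => PySem.Set.contains mixed_set m))).foldl
        (fun gs pr => pvAppendAt gs pr.1 pr.2) gs) groups0
  let groups := groups.map (fun g => PySem.List.sorted g (fun x => x) false)
  groups.filter (fun g => !g.isEmpty)

-- ===== PORT B =====
-- the body of B's inner event loop: 'if m in mixed_set: events.append((slot, m)); slot += 1'
def pvEvStep (p : Int → Bool) (st : List (Int × Int) × Int) (m : Int) : List (Int × Int) × Int :=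
  if p m then (st.1 ++ [(st.2, m)], st.2 + 1) else st

-- B's while loop: cut the sorted event list into runs of equal slot, keeping the mux parts
def pvRuns : List (Int × Int) → List (List Int)
  | [] => []
  | (p, m) :: rest =>
      (m :: (rest.takeWhile (fun e => e.1 == p)).map Prod.snd)
        :: pvRuns (rest.dropWhile (fun e => e.1 == p))
termination_by l => l.length
decreasing_by
  simp only [List.length_cons]
  exact Nat.lt_succ_of_le (List.length_dropWhile_le _ _)

def group_mixed_muxes_by_box_b_py_alt (mixed_mux_ids : List Int) (box_b_module_map : List (String × List Int)) : List (List Int) :=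
  if mixed_mux_ids = [] then [] else
  let mixed_set : PySem.Set Int := PySem.Set.ofList mixed_mux_ids
  let events : List (Int × Int) :=
    (PySem.Dict.ofList box_b_module_map).values.foldl
      (fun ev mux_ids => (mux_ids.foldl (pvEvStep (fun m => PySem.Set.contains mixed_set m)) (ev, 0)).1) []
  if events = [] then [mixed_mux_ids] else
  pvRuns (PySem.List.sorted2 events Prod.fst Prod.snd false)

-- ===== PRECONDITION & SPEC =====
def Spec_group_mixed_muxes_by_box_b_py (mixed_mux_ids : List Int) (box_b_module_map : List (String × List Int)) (out : List (List Int)) : Prop := out = group_mixed_muxes_by_box_b_py_alt mixed_mux_ids box_b_module_map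
instance (mixed_mux_ids : List Int) (box_b_module_map : List (String × List Int)) (out : List (List Int)) : Decidable (Spec_group_mixed_muxes_by_box_b_py mixed_mux_ids box_b_module_map out) := by unfold Spec_group_mixed_muxes_by_box_b_py; infer_instance

-- ===== CLAIM (what is proved, stated in full; the proofs are below) =====
def Claim_equal_group_mixed_muxes_by_box_b_py : Prop := ∀ (mixed_mux_ids : List Int) (box_b_module_map : List (String × List Int)), Dom_group_mixed_muxes_by_box_b_py mixed_mux_ids box_b_module_map → Spec_group_mixed_muxes_by_box_b_py mixed_mux_ids box_b_module_map (group_mixed_muxes_by_box_b_py mixed_mux_ids box_b_module_map)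

-- ===== LEMMAS AND PROOFS =====

-- ---------- A-side: the preallocated-groups fold computes the columns of the relevant lists ----------

-- what A's inner enumerate-loop appends to slot i when its relevant list is r and indexing starts at s
def pvColElem (r : List Int) (s i : Nat) : List Int :=
  if s ≤ i then (r[i-s]?).toList else []

theorem pv_inner_len (r : List Int) : ∀ (s : Int) (gs : List (List Int)),
    ((PySem.List.enumerate r s).foldl (fun gs pr => pvAppendAt gs pr.1 pr.2) gs).length = gs.length := by
  induction r with
  | nil => intro s gs; simp [PySem.List.enumerate_nil]
  | cons x r ih =>
    intro s gs
    rw [PySem.List.enumerate_cons, List.foldl_cons, ih]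
    simp [pvAppendAt, PySem.List.length_pySetD]

theorem pv_inner_get (r : List Int) : ∀ (s : Nat) (gs : List (List Int)), s + r.length ≤ gs.length →
    ∀ i : Nat, ((PySem.List.enumerate r (s : Int)).foldl (fun gs pr => pvAppendAt gs pr.1 pr.2) gs)[i]? =
      gs[i]?.map (fun g => g ++ pvColElem r s i) := by
  induction r with
  | nil =>
    intro s gs _ i
    cases hgi : gs[i]? <;> simp [PySem.List.enumerate_nil, pvColElem, hgi]
  | cons x r ih =>
    intro s gs h i
    rw [PySem.List.enumerate_cons, List.foldl_cons]
    have hs : s < gs.length := by simp at h; omega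
    have hstep : pvAppendAt gs (s : Int) x = gs.set s (gs.getD s [] ++ [x]) := by
      simp [pvAppendAt, PySem.List.pySetD_natCast, PySem.List.pyGetD_natCast]
    have hcast : (s : Int) + 1 = ((s + 1 : Nat) : Int) := by push_cast; ring
    rw [hstep, hcast,
      ih (s + 1) _ (by simp at h ⊢; omega) i]
    rw [List.getElem?_set]
    by_cases his : s = i
    · subst his
      have h1 : pvColElem r (s + 1) s = [] := by
        simp only [pvColElem]; rw [if_neg (by omega)]
      have h2 : pvColElem (x :: r) s s = [x] := by
        simp only [pvColElem]; rw [if_pos (le_refl s)]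
        simp
      rw [if_pos rfl, if_pos hs, h1, h2,
        List.getElem?_eq_getElem hs, List.getD_eq_getElem gs [] hs]
      simp
    · rw [if_neg his]
      have : pvColElem r (s + 1) i = pvColElem (x :: r) s i := by
        simp only [pvColElem]
        by_cases h2 : s ≤ i
        · have h4 : s + 1 ≤ i := by omega
          rw [if_pos h4, if_pos h2]
          have h5 : i - s = (i - (s + 1)) + 1 := by omega
          rw [h5, List.getElem?_cons_succ]
        · rw [if_neg (by omega), if_neg h2]
      rw [this]

theorem pv_outer_get (rs : List (List Int)) : ∀ (gs : List (List Int)), (∀ r ∈ rs, r.length ≤ gs.length) →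
    ∀ i : Nat, (rs.foldl (fun gs r => (PySem.List.enumerate r 0).foldl (fun gs pr => pvAppendAt gs pr.1 pr.2) gs) gs)[i]? =
      gs[i]?.map (fun g => g ++ rs.filterMap (fun r => r[i]?)) := by
  induction rs with
  | nil => intro gs _ i; cases hgi : gs[i]? <;> simp [hgi]
  | cons r rs ih =>
    intro gs h i
    rw [List.foldl_cons]
    have hlen1 : ((PySem.List.enumerate r 0).foldl (fun gs pr => pvAppendAt gs pr.1 pr.2) gs).length = gs.length :=
      pv_inner_len r 0 gs
    rw [ih _ (fun r' hr' => by rw [hlen1]; exact h r' (List.mem_cons_of_mem _ hr')) i]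
    have hin := pv_inner_get r 0 gs (by simpa using h r List.mem_cons_self) i
    rw [Nat.cast_zero] at hin
    rw [hin]
    have hcol : pvColElem r 0 i = (r[i]?).toList := by simp [pvColElem]
    cases hgi : gs[i]? with
    | none => simp
    | some g =>
      cases hri : r[i]? <;>
        simp [hcol, hri, List.append_assoc]

theorem pv_foldl_max_le (ns : List Nat) : ∀ (a m : Nat), a ≤ m → (∀ y ∈ ns, y ≤ m) → ns.foldl max a ≤ m := by
  induction ns with
  | nil => intro a m ha _; exact ha
  | cons y ns ih =>
    intro a m ha h
    rw [List.foldl_cons]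
    exact ih _ _ (max_le ha (h y List.mem_cons_self)) (fun z hz => h z (List.mem_cons_of_mem _ hz))

theorem pv_foldl_max_eq_maxD (ns : List Nat) : ns.foldl max 0 = PySem.List.maxD ns (fun x => x) 0 := by
  cases h : PySem.List.max? ns (fun x => x) with
  | none =>
    rw [(PySem.List.max?_eq_none_iff ns _).mp h]
    rfl
  | some m =>
    have hm := PySem.List.max?_mem h
    have hmax := PySem.List.max?_isMax h
    have h1 : ns.foldl max 0 ≤ m := pv_foldl_max_le ns 0 m (Nat.zero_le m) (fun y hy => hmax y hy)
    have h2 : m ≤ ns.foldl max 0 := (PySem.List.le_foldl_max ns 0).2 m hm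
    simp [PySem.List.maxD, h]
    omega

-- ---------- B-side: the event loops build the flat enumerate list ----------

theorem pv_ev_row (p : Int → Bool) (r : List Int) : ∀ (ev : List (Int × Int)) (k : Int),
    r.foldl (pvEvStep p) (ev, k) =
      (ev ++ PySem.List.enumerate (r.filter p) k, k + (r.filter p).length) := by
  induction r with
  | nil => intro ev k; simp [PySem.List.enumerate_nil]
  | cons m r ih =>
    intro ev k
    rw [List.foldl_cons]
    by_cases hp : p m = true
    · rw [show pvEvStep p (ev, k) m = (ev ++ [(k, m)], k + 1) from by simp [pvEvStep, hp]]
      rw [ih, List.filter_cons_of_pos hp, PySem.List.enumerate_cons]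
      simp only [Prod.mk.injEq]
      refine ⟨by simp, by simp only [List.length_cons]; push_cast; omega⟩
    · rw [show pvEvStep p (ev, k) m = (ev, k) from by simp [pvEvStep, hp]]
      rw [ih, List.filter_cons_of_neg (by simpa using hp)]

theorem pv_ev_rows (p : Int → Bool) (vs : List (List Int)) : ∀ (acc : List (Int × Int)),
    vs.foldl (fun ev mux_ids => (mux_ids.foldl (pvEvStep p) (ev, 0)).1) acc =
      acc ++ vs.flatMap (fun v => PySem.List.enumerate (v.filter p) 0) := by
  induction vs with
  | nil => intro acc; simp
  | cons v vs ih =>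
    intro acc
    rw [List.foldl_cons, pv_ev_row, ih, List.flatMap_cons, List.append_assoc]

-- ---------- the lexicographic order Python's tuple sort uses ----------

def pvLe (a b : Int × Int) : Prop := a.1 < b.1 ∨ (a.1 = b.1 ∧ a.2 ≤ b.2)

def pvBefore (a b : Int × Int) : Bool :=
  decide (a.1 < b.1) || (!decide (b.1 < a.1) && decide (a.2 < b.2))

theorem pvLe_trans (a b c : Int × Int) (h1 : pvLe a b) (h2 : pvLe b c) : pvLe a c := by
  simp only [pvLe] at *; omega

theorem pvLe_antisymm (a b : Int × Int) (h1 : pvLe a b) (h2 : pvLe b a) : a = b := by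
  obtain ⟨a1, a2⟩ := a; obtain ⟨b1, b2⟩ := b
  simp only [pvLe, Prod.mk.injEq] at *; omega

theorem pvBefore_le {a b : Int × Int} (h : pvBefore a b = true) : pvLe a b := by
  simp only [pvBefore, Bool.or_eq_true, Bool.and_eq_true, Bool.not_eq_true', decide_eq_true_eq,
    decide_eq_false_iff_not] at h
  simp only [pvLe]; omega

theorem pvBefore_not_le {a b : Int × Int} (h : ¬ pvBefore a b = true) : pvLe b a := by
  simp only [pvBefore, Bool.or_eq_true, Bool.and_eq_true, Bool.not_eq_true', decide_eq_true_eq,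
    decide_eq_false_iff_not, not_or, not_and] at h
  simp only [pvLe]; omega

theorem pv_insertBy_pairwise : ∀ (acc : List (Int × Int)), acc.Pairwise pvLe →
    ∀ x, (PySem.List.insertBy pvBefore x acc).Pairwise pvLe := by
  intro acc
  induction acc with
  | nil => intro _ x; simp [PySem.List.insertBy]
  | cons y ys ih =>
    intro h x
    rw [List.pairwise_cons] at h
    simp only [PySem.List.insertBy]
    by_cases hb : pvBefore x y = true
    · rw [if_pos hb]
      refine List.Pairwise.cons ?_ (List.Pairwise.cons h.1 h.2)
      intro z hz
      rcases List.mem_cons.mp hz with rfl | hz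
      · exact pvBefore_le hb
      · exact pvLe_trans _ _ _ (pvBefore_le hb) (h.1 z hz)
    · rw [if_neg hb]
      refine List.Pairwise.cons ?_ (ih h.2 x)
      intro z hz
      rcases (PySem.List.mem_insertBy _ _ _ _).mp hz with rfl | hz
      · exact pvBefore_not_le hb
      · exact h.1 z hz

theorem pv_sorted2_pairwise (xs : List (Int × Int)) :
    (PySem.List.sorted2 xs Prod.fst Prod.snd false).Pairwise pvLe := by
  have hrw : PySem.List.sorted2 xs Prod.fst Prod.snd false =
      xs.foldl (fun acc x => PySem.List.insertBy pvBefore x acc) [] := rfl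
  rw [hrw]
  have : ∀ (l : List (Int × Int)) (acc : List (Int × Int)), acc.Pairwise pvLe →
      (l.foldl (fun acc x => PySem.List.insertBy pvBefore x acc) acc).Pairwise pvLe := by
    intro l
    induction l with
    | nil => intro acc h; exact h
    | cons x l ih => intro acc h; exact ih _ (pv_insertBy_pairwise acc h x)
  exact this xs [] (List.Pairwise.nil)

theorem pv_sorted2_eq {xs ys : List (Int × Int)} (hperm : ys.Perm xs) (hs : ys.Pairwise pvLe) :
    PySem.List.sorted2 xs Prod.fst Prod.snd false = ys :=
  List.Perm.eq_of_pairwise (fun a b _ _ hab hba => pvLe_antisymm a b hab hba)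
    (pv_sorted2_pairwise xs) hs
    ((PySem.List.sorted2_perm xs Prod.fst Prod.snd false).trans hperm.symm)

-- ---------- permuting the row-major event list into column-major blocks ----------

theorem pv_filterMap_cons {α β : Type} (f : α → Option β) (a : α) (l : List α) :
    List.filterMap f (a :: l) = (f a).toList ++ List.filterMap f l := by
  cases h : f a <;> simp [h]

theorem pv_perm_flatMap_congr {α β : Type} (l : List α) (f g : α → List β)
    (h : ∀ a ∈ l, (f a).Perm (g a)) : (l.flatMap f).Perm (l.flatMap g) := by
  induction l with
  | nil => simp
  | cons a l ih =>
    rw [List.flatMap_cons, List.flatMap_cons]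
    exact (h a List.mem_cons_self).append (ih (fun b hb => h b (List.mem_cons_of_mem _ hb)))

theorem pv_perm_flatMap_append {α β : Type} (l : List α) (f g : α → List β) :
    (l.flatMap (fun a => f a ++ g a)).Perm (l.flatMap f ++ l.flatMap g) := by
  induction l with
  | nil => simp
  | cons a l ih =>
    rw [List.flatMap_cons, List.flatMap_cons, List.flatMap_cons]
    refine ((ih.append_left (f a ++ g a)).trans ?_)
    rw [show f a ++ g a ++ (l.flatMap f ++ l.flatMap g)
        = f a ++ (g a ++ (l.flatMap f ++ l.flatMap g)) from by simp [List.append_assoc]]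
    refine (((List.perm_append_comm_assoc _ _ _).append_left (f a)).trans ?_)
    exact List.Perm.of_eq (by simp [List.append_assoc])

theorem pv_row_eq (r : List Int) : ∀ (n : Nat) (s : Int), r.length ≤ n →
    (List.range n).flatMap (fun (i : Nat) => ((r[i]?).toList.map (fun x => (s + (i : Int), x)))) =
      PySem.List.enumerate r s := by
  induction r with
  | nil =>
    intro n s _
    rw [PySem.List.enumerate_nil]
    simp
  | cons x xs ih =>
    intro n s h
    obtain ⟨n', rfl⟩ : ∃ n', n = n' + 1 := ⟨n - 1, by simp at h; omega⟩
    rw [List.range_succ_eq_map, List.flatMap_cons, List.flatMap_map, PySem.List.enumerate_cons]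
    have h1 : (((x :: xs)[(0 : Nat)]?).toList.map (fun y => (s + ((0 : Nat) : Int), y))) = [(s, x)] := by
      simp
    rw [h1]
    have h2 : (fun (a : Nat) => (((x :: xs)[Nat.succ a]?).toList.map (fun y => (s + ((Nat.succ a : Nat) : Int), y))))
        = fun (a : Nat) => ((xs[a]?).toList.map (fun y => ((s + 1) + (a : Int), y))) := by
      funext a
      simp only [Nat.succ_eq_add_one, List.getElem?_cons_succ]
      congr 1
      funext y
      simp only [Prod.mk.injEq]
      exact ⟨by push_cast; ring, trivial⟩
    rw [h2, ih n' (s + 1) (by simp at h; omega)]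
    rfl

theorem pv_E_perm_cols (rs : List (List Int)) : ∀ (n : Nat), (∀ r ∈ rs, r.length ≤ n) →
    (rs.flatMap (fun r => PySem.List.enumerate r 0)).Perm
      ((List.range n).flatMap (fun (i : Nat) =>
        (rs.filterMap (fun r => r[i]?)).map (fun m => ((i : Int), m)))) := by
  induction rs with
  | nil => intro n _; simp
  | cons r rest ih =>
    intro n h
    rw [List.flatMap_cons]
    have hsplit : (fun (i : Nat) => ((r :: rest).filterMap (fun r => r[i]?)).map (fun m => ((i : Int), m)))
        = fun (i : Nat) => ((r[i]?).toList.map (fun m => ((i : Int), m)))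
            ++ ((rest.filterMap (fun r => r[i]?)).map (fun m => ((i : Int), m))) := by
      funext i
      rw [pv_filterMap_cons, List.map_append]
    rw [hsplit]
    refine List.Perm.trans ?_ (pv_perm_flatMap_append _ _ _).symm
    have hrow : (List.range n).flatMap (fun (i : Nat) => ((r[i]?).toList.map (fun m => ((i : Int), m))))
        = PySem.List.enumerate r 0 := by
      have := pv_row_eq r n 0 (h r List.mem_cons_self)
      simpa using this
    rw [hrow]
    exact (List.Perm.refl _).append (ih n (fun r' hr' => h r' (List.mem_cons_of_mem _ hr')))

theorem pv_blocks_pairwise (gs : Nat → List Int) : ∀ (is : List Nat), is.Pairwise (· < ·) →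
    (∀ i ∈ is, (gs i).Pairwise (· ≤ ·)) →
    (is.flatMap (fun i => (gs i).map (fun m => ((i : Int), m)))).Pairwise pvLe := by
  intro is
  induction is with
  | nil => intro _ _; simp
  | cons i rest ih =>
    intro hp hs
    rw [List.pairwise_cons] at hp
    rw [List.flatMap_cons, List.pairwise_append]
    refine ⟨?_, ih hp.2 (fun j hj => hs j (List.mem_cons_of_mem _ hj)), ?_⟩
    · rw [List.pairwise_map]
      exact (hs i List.mem_cons_self).imp (fun hab => Or.inr ⟨rfl, hab⟩)
    · intro x hx y hy
      obtain ⟨a, _, rfl⟩ := List.mem_map.mp hx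
      obtain ⟨j, hj, hyj⟩ := List.mem_flatMap.mp hy
      obtain ⟨b, _, rfl⟩ := List.mem_map.mp hyj
      have hij : (i : Int) < (j : Int) := by exact_mod_cast hp.1 j hj
      exact Or.inl hij

-- ---------- cutting the sorted block list into runs ----------

theorem pv_takeWhile_all {α : Type} (p : α → Bool) (l1 l2 : List α) (h : ∀ x ∈ l1, p x = true) :
    (l1 ++ l2).takeWhile p = l1 ++ l2.takeWhile p := by
  induction l1 with
  | nil => simp
  | cons a l1 ih =>
    rw [List.cons_append, List.takeWhile_cons_of_pos (h a List.mem_cons_self), List.cons_append,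
      ih (fun x hx => h x (List.mem_cons_of_mem _ hx))]

theorem pv_dropWhile_all {α : Type} (p : α → Bool) (l1 l2 : List α) (h : ∀ x ∈ l1, p x = true) :
    (l1 ++ l2).dropWhile p = l2.dropWhile p := by
  induction l1 with
  | nil => simp
  | cons a l1 ih =>
    rw [List.cons_append, List.dropWhile_cons_of_pos (h a List.mem_cons_self),
      ih (fun x hx => h x (List.mem_cons_of_mem _ hx))]

theorem pv_takeWhile_none {α : Type} (p : α → Bool) (l : List α) (h : ∀ x ∈ l, p x = false) :
    l.takeWhile p = [] ∧ l.dropWhile p = l := by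
  cases l with
  | nil => simp
  | cons a l =>
    constructor
    · exact List.takeWhile_cons_of_neg (by simp [h a List.mem_cons_self])
    · exact List.dropWhile_cons_of_neg (by simp [h a List.mem_cons_self])

theorem pv_runs_blocks (gs : Nat → List Int) : ∀ (is : List Nat), is.Pairwise (· < ·) →
    (∀ i ∈ is, gs i ≠ []) →
    pvRuns (is.flatMap (fun i => (gs i).map (fun m => ((i : Int), m)))) = is.map gs := by
  intro is
  induction is with
  | nil => intro _ _; simp [pvRuns]
  | cons i rest ih =>
    intro hp hne
    rw [List.pairwise_cons] at hp
    obtain ⟨m, ms, hgi⟩ : ∃ m ms, gs i = m :: ms := by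
      cases h : gs i with
      | nil => exact absurd h (hne i List.mem_cons_self)
      | cons a b => exact ⟨a, b, rfl⟩
    have hrest_ne : ∀ e ∈ rest.flatMap (fun j => (gs j).map (fun m => ((j : Int), m))),
        (e.1 == (i : Int)) = false := by
      intro e he
      obtain ⟨j, hj, hej⟩ := List.mem_flatMap.mp he
      obtain ⟨b, _, rfl⟩ := List.mem_map.mp hej
      have : i < j := hp.1 j hj
      simp only [beq_eq_false_iff_ne, ne_eq, Nat.cast_inj]
      intro hc
      omega
    rw [List.flatMap_cons, hgi, List.map_cons, List.cons_append, pvRuns]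
    have htake : (((ms.map (fun m => ((i : Int), m))) ++
          rest.flatMap (fun j => (gs j).map (fun m => ((j : Int), m)))).takeWhile
            (fun e => e.1 == (i : Int)))
        = ms.map (fun m => ((i : Int), m)) := by
      rw [pv_takeWhile_all _ _ _ (by intro x hx; obtain ⟨b, _, rfl⟩ := List.mem_map.mp hx; simp),
        (pv_takeWhile_none _ _ hrest_ne).1, List.append_nil]
    have hdrop : (((ms.map (fun m => ((i : Int), m))) ++
          rest.flatMap (fun j => (gs j).map (fun m => ((j : Int), m)))).dropWhile
            (fun e => e.1 == (i : Int)))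
        = rest.flatMap (fun j => (gs j).map (fun m => ((j : Int), m))) := by
      rw [pv_dropWhile_all _ _ _ (by intro x hx; obtain ⟨b, _, rfl⟩ := List.mem_map.mp hx; simp),
        (pv_takeWhile_none _ _ hrest_ne).2]
    rw [htake, hdrop, List.map_map, ih hp.2 (fun j hj => hne j (List.mem_cons_of_mem _ hj)),
      List.map_cons, hgi]
    simp

-- ===== VERDICT (by name: the statement is the Claim_ definition above) =====
theorem group_mixed_muxes_by_box_b_py_spec : Claim_equal_group_mixed_muxes_by_box_b_py := by
  intro mixed bmap _
  unfold Spec_group_mixed_muxes_by_box_b_py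
  by_cases hm : mixed = []
  · simp [group_mixed_muxes_by_box_b_py, group_mixed_muxes_by_box_b_py_alt, hm]
  · simp only [group_mixed_muxes_by_box_b_py, group_mixed_muxes_by_box_b_py_alt, if_neg hm,
      PySem.Dict.values]
    set p : Int → Bool := fun m => PySem.Set.contains (PySem.Set.ofList mixed) m with hp
    set items := (PySem.Dict.ofList bmap).items with hitems
    set rel : List (List Int) := items.map (fun kv => kv.2.filter p) with hrel
    -- B's event loops produce the flat row-major enumerate list
    have hevents : (items.map (fun x => x.2)).foldl
        (fun ev mux_ids => (mux_ids.foldl (pvEvStep p) (ev, 0)).1) []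
        = rel.flatMap (fun r => PySem.List.enumerate r 0) := by
      rw [pv_ev_rows, List.nil_append, hrel]
      rw [List.flatMap_map, List.flatMap_map]
    rw [hevents]
    set E := rel.flatMap (fun r => PySem.List.enumerate r 0) with hE
    set n : Nat := items.foldl (fun acc kv => max acc (kv.2.countP p)) 0 with hn
    have hmax : PySem.List.maxD (rel.map (fun r => r.length)) (fun x => x) 0 = n := by
      rw [← pv_foldl_max_eq_maxD, hrel, List.map_map, List.foldl_map, hn]
      simp [List.countP_eq_length_filter, Function.comp]
    have hlenle : ∀ r ∈ rel, r.length ≤ n := by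
      intro r hr
      rw [← hmax]
      cases hmx : PySem.List.max? (rel.map (fun r => r.length)) (fun x => x) with
      | none =>
        have hnil := (PySem.List.max?_eq_none_iff _ _).mp hmx
        rw [List.map_eq_nil_iff] at hnil
        rw [hnil] at hr
        simp at hr
      | some mm =>
        simp only [PySem.List.maxD, hmx]
        exact PySem.List.max?_isMax hmx r.length (List.mem_map_of_mem hr)
    -- n = 0 iff there are no events
    have hiff : n = 0 ↔ E = [] := by
      constructor
      · intro h0
        rw [hE, List.flatMap_eq_nil_iff]
        intro r hr
        have hlen : r.length ≤ 0 := h0 ▸ hlenle r hr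
        have hr0 : r = [] := List.length_eq_zero_iff.mp (by omega)
        rw [hr0, PySem.List.enumerate_nil]
      · intro hE0
        have hfm : items.foldl (fun acc kv => max acc (kv.2.countP p)) 0
            = (items.map (fun kv => kv.2.countP p)).foldl max 0 := by rw [List.foldl_map]
        rw [hn, hfm]
        apply Nat.le_zero.mp
        apply pv_foldl_max_le _ _ _ (le_refl 0)
        intro y hy
        obtain ⟨kv, hkv, rfl⟩ := List.mem_map.mp hy
        have hrmem : kv.2.filter p ∈ rel := by rw [hrel]; exact List.mem_map_of_mem hkv
        have henil : PySem.List.enumerate (kv.2.filter p) (0 : Int) = [] := by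
          rw [hE, List.flatMap_eq_nil_iff] at hE0
          exact hE0 _ hrmem
        have hflen : (kv.2.filter p).length = 0 := by
          have := congrArg List.length henil
          rwa [PySem.List.length_enumerate] at this
        rw [List.countP_eq_length_filter, hflen]
    by_cases h0 : n = 0
    · rw [if_pos h0, if_pos (hiff.mp h0)]
    · rw [if_neg h0, if_neg (fun hE0 => h0 (hiff.mpr hE0))]
      -- the groups-building fold of A, rewritten as a fold over the relevant lists
      have hfold : items.foldl (fun gs kv =>
            (PySem.List.enumerate (kv.2.filter p)).foldl (fun gs pr => pvAppendAt gs pr.1 pr.2) gs)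
            (List.replicate n []) =
          rel.foldl (fun gs r => (PySem.List.enumerate r 0).foldl (fun gs pr => pvAppendAt gs pr.1 pr.2) gs)
            (List.replicate n []) := by
        rw [hrel, List.foldl_map]
      rw [hfold]
      set G := rel.foldl (fun gs r => (PySem.List.enumerate r 0).foldl (fun gs pr => pvAppendAt gs pr.1 pr.2) gs)
        (List.replicate n ([] : List Int)) with hG
      -- the maximum is attained: some relevant list has length n
      obtain ⟨m, hsome⟩ : ∃ m, PySem.List.max? (rel.map (fun r => r.length)) (fun x => x) = some m := by
        cases hc : PySem.List.max? (rel.map (fun r => r.length)) (fun x => x) with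
        | none =>
          exfalso
          apply h0
          rw [← hmax]
          simp [PySem.List.maxD, hc]
        | some m => exact ⟨m, rfl⟩
      have hmn : m = n := by
        rw [← hmax]; simp [PySem.List.maxD, hsome]
      rw [hmn] at hsome
      have hbound : ∀ r ∈ rel, r.length ≤ (List.replicate n ([] : List Int)).length := by
        intro r hr
        rw [List.length_replicate]
        exact hlenle r hr
      obtain ⟨r₀, hr₀, hr₀len⟩ : ∃ r ∈ rel, r.length = n :=
        List.mem_map.mp (PySem.List.max?_mem hsome)
      -- the column at slot i, and the non-emptiness of every column below m
      set col : Nat → List Int := fun i => rel.filterMap (fun r => r[i]?) with hcol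
      have hcol_ne : ∀ i, i < n → col i ≠ [] := by
        intro i him
        rw [hcol, Ne, List.filterMap_eq_nil_iff]
        intro hall
        have := hall r₀ hr₀
        rw [List.getElem?_eq_getElem (by omega)] at this
        simp at this
      -- A's side: the groups are exactly the sorted columns, and none of them is empty
      have hget : ∀ i : Nat, G[i]? = if i < n then some (col i) else none := by
        intro i
        rw [hG, pv_outer_get rel _ hbound i, List.getElem?_replicate]
        by_cases hi : i < n
        · rw [if_pos hi, if_pos hi]; simp [hcol]
        · rw [if_neg hi, if_neg hi]; rfl
      have hmapeq : G.map (fun g => PySem.List.sorted g (fun x => x) false) =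
          (List.range n).map (fun i =>
            PySem.List.sorted (col i) (fun x => x) false) := by
        apply List.ext_getElem?
        intro i
        rw [List.getElem?_map, List.getElem?_map, hget i]
        by_cases hi : i < n
        · rw [if_pos hi, List.getElem?_range hi]; simp
        · rw [if_neg hi, List.getElem?_eq_none (by simp [List.length_range]; omega)]; simp
      have hA : (G.map (fun g => PySem.List.sorted g (fun x => x) false)).filter (fun g => !g.isEmpty)
          = (List.range n).map (fun i => PySem.List.sorted (col i) (fun x => x) false) := by
        rw [hmapeq]
        apply List.filter_eq_self.mpr
        intro g hg
        obtain ⟨i, hi, rfl⟩ := List.mem_map.mp hg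
        have him : i < n := List.mem_range.mp hi
        simp [PySem.List.sorted_eq_nil_iff, hcol_ne i him]
      rw [hA]
      -- B's side: the sorted event list is exactly the column blocks in slot order
      set gs : Nat → List Int := fun i => PySem.List.sorted (col i) (fun x => x) false with hgs
      have hperm : ((List.range n).flatMap (fun i => (gs i).map (fun mm => ((i : Int), mm)))).Perm E := by
        refine List.Perm.trans ?_ (pv_E_perm_cols rel n hlenle).symm
        apply pv_perm_flatMap_congr
        intro i _
        exact (PySem.List.sorted_perm (col i) (fun x => x) false).map _
      have hsorted : PySem.List.sorted2 E Prod.fst Prod.snd false =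
          (List.range n).flatMap (fun i => (gs i).map (fun mm => ((i : Int), mm))) :=
        pv_sorted2_eq hperm
          (pv_blocks_pairwise gs (List.range n) (List.pairwise_lt_range)
            (fun i _ => by rw [hgs]; exact PySem.List.sorted_pairwise _ _))
      rw [hsorted, pv_runs_blocks gs (List.range n) (List.pairwise_lt_range)
        (fun i hi => by
          rw [hgs]
          simp only [Ne, PySem.List.sorted_eq_nil_iff]
          exact hcol_ne i (List.mem_range.mp hi))]
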